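-- pv_equiv track=rewrite | github.com/gali1998/ExtendedIntroToCSHomework | 3/idan.py | idan_cycle
-- ===== SOURCE A (Python) =====
-- def verify_size(n):
--     if n < 2:
--         raise ValueError('Cannot create cycle smaller than 2')
--
-- def idan_cycle(n):
--     verify_size(n)
--     cycle_matrix = []
--     for i in range(n):
--         cycle_matrix.append([0]*n)
--         next_neighbor_index = (i + 1)%n
--         last_neighbor_index = i - 1
--         cycle_matrix[i][next_neighbor_index] = 1
--         cycle_matrix[i][last_neighbor_index] = 1
--     return cycle_matrix
-- ===== SOURCE B (Python) =====
-- def verify_size(n):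
--     if n < 2:
--         raise ValueError('Cannot create cycle smaller than 2')
--
-- def idan_cycle(n):
--     verify_size(n)
--     first_row = [0, 1] + [0] * (n - 3) + [1] if n > 2 else [0, 1]
--     return [first_row[-i:] + first_row[:-i] for i in range(n)]
-- ===== Notes on version B (the rewrite author's own statement) =====
-- stated objective: alternative
-- what changed: A builds each row of zeros and scatters two 1s via index assignment (with a negative-index wrap for i-1); B builds the first row once in closed form and produces row i as its rotation first_row[-i:] + first_row[:-i] (circulant-matrix construction).
import Mathlib
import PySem

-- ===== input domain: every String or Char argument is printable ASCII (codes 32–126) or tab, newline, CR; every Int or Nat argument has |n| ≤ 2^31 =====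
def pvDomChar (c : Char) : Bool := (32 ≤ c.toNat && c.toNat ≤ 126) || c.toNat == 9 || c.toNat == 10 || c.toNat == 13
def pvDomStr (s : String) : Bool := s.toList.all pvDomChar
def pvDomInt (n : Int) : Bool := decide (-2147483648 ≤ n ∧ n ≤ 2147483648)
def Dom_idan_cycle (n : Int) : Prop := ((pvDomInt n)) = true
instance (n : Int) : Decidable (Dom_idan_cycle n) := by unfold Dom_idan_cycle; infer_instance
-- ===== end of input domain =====

-- B replaces A's per-row scatter of two 1s (index assignments, negative-index wrap for i-1)
-- by building the first row once and rotating it: a circulant-matrix construction.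

-- ===== PORT A =====
def idan_cycle (n : Int) : List (List Int) :=
  (PySem.List.pyRange 0 n 1).foldl (fun cycle_matrix i =>
    let row := PySem.List.pyRepeat [(0 : Int)] n          -- [0]*n
    let next_neighbor_index := PySem.Int.mod (i + 1) n    -- (i+1)%n
    let last_neighbor_index := i - 1
    cycle_matrix ++
      [PySem.List.pySetD (PySem.List.pySetD row next_neighbor_index 1)
        last_neighbor_index 1]) []

-- ===== PORT B =====
def idan_cycle_alt (n : Int) : List (List Int) :=
  let first_row : List Int :=
    if n > 2 then [0, 1] ++ PySem.List.pyRepeat [(0 : Int)] (n - 3) ++ [1] else [0, 1]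
  (PySem.List.pyRange 0 n 1).map (fun i =>
    PySem.List.slice first_row (some (-i)) none ++
    PySem.List.slice first_row none (some (-i)))

-- ===== PRECONDITION & SPEC =====
-- verify_size raises ValueError for n < 2
def Pre_idan_cycle (n : Int) : Prop := 2 ≤ n
instance (n : Int) : Decidable (Pre_idan_cycle n) := by unfold Pre_idan_cycle; infer_instance
def pvWitness_idan_cycle : Int := (5)

def Spec_idan_cycle (n : Int) (out : List (List Int)) : Prop := out = idan_cycle_alt n
instance (n : Int) (out : List (List Int)) : Decidable (Spec_idan_cycle n out) := by unfold Spec_idan_cycle; infer_instance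

-- ===== CLAIM (what is proved, stated in full; the proofs are below) =====
def Claim_equal_idan_cycle : Prop := ∀ (n : Int), Dom_idan_cycle n → Pre_idan_cycle n → Spec_idan_cycle n (idan_cycle n)

-- ===== LEMMAS AND PROOFS =====

lemma pySetD_neg {α : Type} (xs : List α) (i : Int) (v : α)
    (h1 : i < 0) (h2 : -(xs.length : Int) ≤ i) :
    PySem.List.pySetD xs i v = xs.set (xs.length - (-i).toNat) v := by
  simp [PySem.List.pySetD, PySem.List.pySet?, PySem.List.pyIdx?, not_le.mpr h1, h2]

-- the common elementwise description of row i of the cycle matrix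
lemma row_eq (n : Int) (hn : 2 ≤ n) (i : Int) (h0 : 0 ≤ i) (hi : i < n) :
    PySem.List.pySetD
      (PySem.List.pySetD (PySem.List.pyRepeat [(0 : Int)] n) (PySem.Int.mod (i + 1) n) 1)
      (i - 1) 1
    = (PySem.List.pyRange 0 n 1).map (fun j => if |i - j| = 1 ∨ |i - j| = n - 1 then (1 : Int) else 0) := by
  have hnpos : (0:Int) < n := by omega
  rw [PySem.List.pyRepeat_singleton, PySem.Int.mod_eq_emod_of_pos hnpos]
  have hm0 : 0 ≤ (i + 1) % n := Int.emod_nonneg _ (by omega)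
  rw [PySem.List.pySetD_of_nonneg _ _ hm0]
  have hlen : ((List.replicate n.toNat (0:Int)).set ((i+1) % n).toNat 1).length = n.toNat := by
    simp
  have houter : PySem.List.pySetD ((List.replicate n.toNat (0:Int)).set ((i+1) % n).toNat 1) (i - 1) 1
      = ((List.replicate n.toNat (0:Int)).set ((i+1) % n).toNat 1).set
          (if i = 0 then n.toNat - 1 else (i - 1).toNat) 1 := by
    by_cases h : i = 0
    · subst h
      rw [pySetD_neg _ _ _ (by norm_num) (by rw [hlen]; omega)]
      simp
    · rw [PySem.List.pySetD_of_nonneg _ _ (by omega)]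
      simp [h]
  have hmodn : ((i + 1) % n).toNat = if i = n - 1 then 0 else (i + 1).toNat := by
    split_ifs with h
    · have : i + 1 = n := by omega
      rw [this, Int.emod_self]; rfl
    · rw [Int.emod_eq_of_lt (by omega) (by omega)]
  rw [houter, hmodn, PySem.List.pyRange_one]
  apply List.ext_getElem
  · simp
  · intro k hk1 hk2
    have hkn : k < n.toNat := by simpa using hk1
    simp only [List.getElem_map, List.getElem_range, List.getElem_set,
      List.getElem_replicate, zero_add, Int.abs_eq_natAbs]
    split_ifs <;> omega

-- B's first row, described elementwise
lemma fr_eq (n : Int) (hn : 2 ≤ n) :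
    (if n > 2 then [0, 1] ++ PySem.List.pyRepeat [(0 : Int)] (n - 3) ++ [1] else [(0:Int), 1])
    = (List.range n.toNat).map (fun k => if k = 1 ∨ k = n.toNat - 1 then (1:Int) else 0) := by
  rw [PySem.List.pyRepeat_singleton]
  by_cases h : n > 2
  · rw [if_pos h]
    apply List.ext_getElem
    · simp; omega
    · intro k hk1 hk2
      simp only [List.getElem_map, List.getElem_range]
      rcases k with _ | k
      · rw [List.getElem_append_left (by simp), List.getElem_append_left (by simp),
            show ([(0:Int),1])[0] = 0 from rfl, if_neg (by omega)]
      rcases k with _ | k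
      · rw [List.getElem_append_left (by simp), List.getElem_append_left (by simp),
            show ([(0:Int),1])[0+1] = 1 from rfl, if_pos (Or.inl rfl)]
      · have hkn : k + 1 + 1 < n.toNat := by simpa using hk2
        by_cases hlt : k < (n - 3).toNat
        · rw [List.getElem_append_left (by simp; omega),
              List.getElem_append_right (by simp),
              List.getElem_replicate, if_neg (by omega)]
        · rw [List.getElem_append_right (by simp; omega),
              List.getElem_singleton, if_pos (Or.inr (by omega))]
  · rw [if_neg h]
    have hn2 : n = 2 := by omega
    subst hn2
    decide

lemma rowB_eq (n : Int) (hn : 2 ≤ n) (i : Int) (h0 : 0 ≤ i) (hi : i < n) :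
    PySem.List.slice
      (if n > 2 then [0, 1] ++ PySem.List.pyRepeat [(0 : Int)] (n - 3) ++ [1] else [(0:Int), 1])
      (some (-i)) none ++
    PySem.List.slice
      (if n > 2 then [0, 1] ++ PySem.List.pyRepeat [(0 : Int)] (n - 3) ++ [1] else [(0:Int), 1])
      none (some (-i))
    = (PySem.List.pyRange 0 n 1).map (fun j => if |i - j| = 1 ∨ |i - j| = n - 1 then (1 : Int) else 0) := by
  rw [fr_eq n hn]
  set f : Nat → Int := fun k => if k = 1 ∨ k = n.toNat - 1 then (1:Int) else 0 with hf
  have hL : ((List.range n.toNat).map f).length = n.toNat := by simp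
  rcases eq_or_lt_of_le h0 with h0' | hpos
  · -- i = 0 : xs[-0:] = xs, xs[:-0] = []
    subst h0'
    rw [neg_zero, PySem.List.slice_zero_start, PySem.List.slice_none_none,
        PySem.List.slice_to _ le_rfl]
    simp only [Int.toNat_zero, List.take_zero, List.append_nil]
    rw [PySem.List.pyRange_one]
    apply List.ext_getElem
    · simp
    · intro k hk1 hk2
      have hkn : k < n.toNat := by simpa using hk1
      simp only [List.getElem_map, List.getElem_range, zero_add, Int.abs_eq_natAbs, hf]
      split_ifs <;> omega
  · -- 0 < i : xs[-i:] = drop (n - i), xs[:-i] = take (n - i)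
    have hcast : -i = -((i.toNat : Nat) : Int) := by omega
    rw [hcast, PySem.List.slice_from_neg_natCast _ _ (by omega),
        PySem.List.slice_to_neg_natCast _ _ (by omega), hL]
    rw [PySem.List.pyRange_one]
    apply List.ext_getElem
    · simp
    · intro k hk1 hk2
      have hkn : k < n.toNat := by
        have := hk1
        simp only [List.length_append, List.length_drop, List.length_take, hL] at this
        omega
      simp only [List.getElem_append, List.getElem_drop, List.getElem_take,
        List.getElem_map, List.getElem_range, List.length_drop,
        List.length_map, List.length_range, zero_add, Int.abs_eq_natAbs, hf]
      split_ifs <;> omega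

lemma flatMap_singleton_eq_map {α β : Type} (f : α → β) (l : List α) :
    l.flatMap (fun x => [f x]) = l.map f := by
  induction l with
  | nil => rfl
  | cons a l ih => simp [ih]

lemma idan_cycle_eq_alt (n : Int) (hn : 2 ≤ n) : idan_cycle n = idan_cycle_alt n := by
  unfold idan_cycle idan_cycle_alt
  rw [PySem.List.foldl_append_eq_flatMap
      (g := fun i => [PySem.List.pySetD
        (PySem.List.pySetD (PySem.List.pyRepeat [(0 : Int)] n) (PySem.Int.mod (i + 1) n) 1)
        (i - 1) 1])]
  rw [List.nil_append, flatMap_singleton_eq_map]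
  apply List.map_congr_left
  intro i hi
  rw [PySem.List.mem_pyRange_one] at hi
  rw [row_eq n hn i hi.1 hi.2, rowB_eq n hn i hi.1 hi.2]

-- ===== VERDICT (by name: the statement is the Claim_ definition above) =====
theorem idan_cycle_spec : Claim_equal_idan_cycle := by
  intro n _ hpre
  unfold Spec_idan_cycle
  exact idan_cycle_eq_alt n hpre
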